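-- pv_equiv track=rewrite | github.com/Sagit-ctrl/Py-Miner | main.py | check_pos_mouse
-- ===== SOURCE A (Python) =====
-- WIDTH = 25
--
-- HEIGHT = 25
--
-- BLANK = 2
--
-- NUM_X = 16
--
-- NUM_Y = 16
--
-- def check_pos_mouse(pos):
--     check_pos_position = False
--     check_pos = []
--     for i in range(NUM_X + 1):
--         for j in range(NUM_Y + 1):
--             x = BLANK * (i + 1) + WIDTH * i
--             y = BLANK * (j + 1) + HEIGHT * j
--             if x > pos[0] and y > pos[1] and check_pos_position == False:
--                 check_pos = [i - 1, j - 1]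
--                 check_pos_position = True
--     return check_pos
-- ===== SOURCE B (Python) =====
-- WIDTH = 25
-- HEIGHT = 25
-- BLANK = 2
-- NUM_X = 16
-- NUM_Y = 16
--
-- def check_pos_mouse(pos):
--     # The condition factors: x depends only on i, y only on j, and A records the
--     # first hit, i.e. the lexicographically smallest (i, j) - which is the smallest
--     # i and, independently, the smallest j. Two single passes instead of a nested scan.
--     i = next((i for i in range(NUM_X + 1) if BLANK * (i + 1) + WIDTH * i > pos[0]), None)
--     j = next((j for j in range(NUM_Y + 1) if BLANK * (j + 1) + HEIGHT * j > pos[1]), None)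
--     if i is None or j is None:
--         return []
--     return [i - 1, j - 1]
-- ===== Notes on version B (the rewrite author's own statement) =====
-- stated objective: simpler
-- what changed: The x/y tests depend only on i/j respectively, so the nested 17x17 first-hit scan is replaced by two independent single passes that find the smallest i and smallest j, returning [] if either is missing.
import Mathlib
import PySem

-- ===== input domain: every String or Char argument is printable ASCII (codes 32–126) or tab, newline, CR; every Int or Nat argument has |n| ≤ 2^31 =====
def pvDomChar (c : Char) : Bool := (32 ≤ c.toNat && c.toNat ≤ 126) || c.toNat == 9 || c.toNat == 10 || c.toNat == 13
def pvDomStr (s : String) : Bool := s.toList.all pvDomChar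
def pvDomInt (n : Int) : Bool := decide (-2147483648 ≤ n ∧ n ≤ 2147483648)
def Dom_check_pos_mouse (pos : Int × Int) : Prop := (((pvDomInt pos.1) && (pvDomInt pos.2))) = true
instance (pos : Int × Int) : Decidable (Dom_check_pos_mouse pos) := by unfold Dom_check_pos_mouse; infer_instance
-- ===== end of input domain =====

-- B replaces A's nested 17x17 first-hit scan by two independent single passes (simpler decomposition).
-- ===== PORT A =====
def pyWIDTH : Int := 25
def pyHEIGHT : Int := 25
def pyBLANK : Int := 2
def pyNUM_X : Int := 16
def pyNUM_Y : Int := 16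

def check_pos_mouse (pos : Int × Int) : List Int :=
  let st :=
    (PySem.List.pyRange 0 (pyNUM_X + 1) 1).foldl (fun (st : Bool × List Int) i =>
      (PySem.List.pyRange 0 (pyNUM_Y + 1) 1).foldl (fun (st : Bool × List Int) j =>
        let x := pyBLANK * (i + 1) + pyWIDTH * i
        let y := pyBLANK * (j + 1) + pyHEIGHT * j
        if x > pos.1 ∧ y > pos.2 ∧ st.1 = false then (true, [i - 1, j - 1]) else st) st)
      (false, [])
  st.2

-- ===== PORT B =====
def check_pos_mouse_alt (pos : Int × Int) : List Int :=
  let i? := (PySem.List.pyRange 0 (pyNUM_X + 1) 1).find?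
      (fun i => decide (pyBLANK * (i + 1) + pyWIDTH * i > pos.1))
  let j? := (PySem.List.pyRange 0 (pyNUM_Y + 1) 1).find?
      (fun j => decide (pyBLANK * (j + 1) + pyHEIGHT * j > pos.2))
  match i?, j? with
  | some i, some j => [i - 1, j - 1]
  | _, _ => []

-- ===== PRECONDITION & SPEC =====
def Spec_check_pos_mouse (pos : Int × Int) (out : List Int) : Prop := out = check_pos_mouse_alt pos
instance (pos : Int × Int) (out : List Int) : Decidable (Spec_check_pos_mouse pos out) := by unfold Spec_check_pos_mouse; infer_instance

-- ===== CLAIM (what is proved, stated in full; the proofs are below) =====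
def Claim_equal_check_pos_mouse : Prop := ∀ (pos : Int × Int), Dom_check_pos_mouse pos → Spec_check_pos_mouse pos (check_pos_mouse pos)

-- ===== LEMMAS AND PROOFS =====


-- inner loop of A, for a fixed i, characterised by find? on the j-range
theorem pv_inner (px py : Int) (i : Int) (l : List Int) (st : Bool × List Int) :
    (l.foldl (fun (st : Bool × List Int) j =>
        let x := pyBLANK * (i + 1) + pyWIDTH * i
        let y := pyBLANK * (j + 1) + pyHEIGHT * j
        if x > px ∧ y > py ∧ st.1 = false then (true, [i - 1, j - 1]) else st) st)
    = if st.1 = true then st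
      else if pyBLANK * (i + 1) + pyWIDTH * i > px then
        match l.find? (fun j => decide (pyBLANK * (j + 1) + pyHEIGHT * j > py)) with
        | some j => (true, [i - 1, j - 1])
        | none => st
      else st := by
  induction l generalizing st with
  | nil => simp
  | cons j t ih =>
    simp only [List.foldl_cons, List.find?_cons]
    by_cases hs : st.1 = true
    · have hcond : ¬ (pyBLANK * (i + 1) + pyWIDTH * i > px ∧
          pyBLANK * (j + 1) + pyHEIGHT * j > py ∧ st.1 = false) := by
        simp [hs]
      rw [if_neg hcond, ih]
      simp [hs]
    · by_cases hx : pyBLANK * (i + 1) + pyWIDTH * i > px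
      · by_cases hy : pyBLANK * (j + 1) + pyHEIGHT * j > py
        · have : (pyBLANK * (i + 1) + pyWIDTH * i > px ∧
              pyBLANK * (j + 1) + pyHEIGHT * j > py ∧ st.1 = false) := by
            exact ⟨hx, hy, by simpa using hs⟩
          rw [if_pos this, ih]
          simp [hy, hs, hx]
        · have hcond : ¬ (pyBLANK * (i + 1) + pyWIDTH * i > px ∧
              pyBLANK * (j + 1) + pyHEIGHT * j > py ∧ st.1 = false) := by tauto
          rw [if_neg hcond, ih]
          simp [hy, hs, hx]
      · have hcond : ¬ (pyBLANK * (i + 1) + pyWIDTH * i > px ∧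
            pyBLANK * (j + 1) + pyHEIGHT * j > py ∧ st.1 = false) := by tauto
        rw [if_neg hcond, ih]
        simp [hs, hx]

-- outer loop of A characterised by the two independent find?s
theorem pv_outer (px py : Int) (l : List Int) (st : Bool × List Int) :
    (l.foldl (fun (st : Bool × List Int) i =>
      (PySem.List.pyRange 0 (pyNUM_Y + 1) 1).foldl (fun (st : Bool × List Int) j =>
        let x := pyBLANK * (i + 1) + pyWIDTH * i
        let y := pyBLANK * (j + 1) + pyHEIGHT * j
        if x > px ∧ y > py ∧ st.1 = false then (true, [i - 1, j - 1]) else st) st) st)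
    = if st.1 = true then st
      else
        match l.find? (fun i => decide (pyBLANK * (i + 1) + pyWIDTH * i > px)),
              (PySem.List.pyRange 0 (pyNUM_Y + 1) 1).find?
                (fun j => decide (pyBLANK * (j + 1) + pyHEIGHT * j > py)) with
        | some i, some j => (true, [i - 1, j - 1])
        | _, _ => st := by
  induction l generalizing st with
  | nil =>
    simp only [List.foldl_nil, List.find?_nil]
    split_ifs
    · rfl
    · rfl
  | cons i t ih =>
    simp only [List.foldl_cons, List.find?_cons]
    rw [pv_inner, ih]
    by_cases hs : st.1 = true
    · simp only [if_pos hs]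
    · simp only [if_neg hs]
      by_cases hx : pyBLANK * (i + 1) + pyWIDTH * i > px
      · cases hJ : (PySem.List.pyRange 0 (pyNUM_Y + 1) 1).find?
            (fun j => decide (pyBLANK * (j + 1) + pyHEIGHT * j > py)) with
        | none => simp [hx]
        | some j => simp [hx]
      · simp [hx, hs]

-- ===== VERDICT (by name: the statement is the Claim_ definition above) =====
theorem check_pos_mouse_spec : Claim_equal_check_pos_mouse := by
  intro pos _
  unfold Spec_check_pos_mouse check_pos_mouse check_pos_mouse_alt
  rw [pv_outer]
  simp only [if_neg (by simp : ¬ ((false, ([] : List Int)).1 = true))]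
  cases hI : (PySem.List.pyRange 0 (pyNUM_X + 1) 1).find?
      (fun i => decide (pyBLANK * (i + 1) + pyWIDTH * i > pos.1)) with
  | none =>
    cases hJ : (PySem.List.pyRange 0 (pyNUM_Y + 1) 1).find?
        (fun j => decide (pyBLANK * (j + 1) + pyHEIGHT * j > pos.2)) <;> rfl
  | some i =>
    cases hJ : (PySem.List.pyRange 0 (pyNUM_Y + 1) 1).find?
        (fun j => decide (pyBLANK * (j + 1) + pyHEIGHT * j > pos.2)) <;> rfl
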